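-- pv_equiv track=rewrite | github.com/happa64/AtCoder_Beginner_Contest | ABC/ABC004/ABC004-D-WA.py | solve
-- ===== SOURCE A (Python) =====
-- def solve(n):
--     i = 0
--     cost = 0
--     res = 0
--     while n != i + 1:
--         if i % 2 == 0:
--             cost += 1
--         res += cost
--         i += 1
--     return res
-- ===== SOURCE B (Python) =====
-- def solve(n):
--     # closed form: res = sum_{i=0}^{n-2} (i//2 + 1) = m + (m-1)**2 // 4 with m = n-1
--     m = n - 1
--     return m + (m - 1) ** 2 // 4
-- ===== Notes on version B (the rewrite author's own statement) =====
-- stated objective: faster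
-- what changed: Replaced the O(n) while-loop accumulation by the closed-form arithmetic-series formula (n-1) + (n-2)^2 // 4.
-- outside the precondition, e.g. on solve(0): A does not finish within the time limit, B returns 0
import Mathlib
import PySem

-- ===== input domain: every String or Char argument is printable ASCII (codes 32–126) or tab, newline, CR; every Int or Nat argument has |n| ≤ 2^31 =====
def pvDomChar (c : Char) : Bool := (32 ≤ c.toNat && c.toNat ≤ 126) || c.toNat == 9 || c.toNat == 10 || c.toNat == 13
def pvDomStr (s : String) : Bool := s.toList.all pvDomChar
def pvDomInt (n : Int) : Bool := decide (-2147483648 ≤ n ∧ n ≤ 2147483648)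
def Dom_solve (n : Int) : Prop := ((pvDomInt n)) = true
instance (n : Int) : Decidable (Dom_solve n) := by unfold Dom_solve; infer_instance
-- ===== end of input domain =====

-- B replaces A's O(n) while-loop accumulation by the closed-form formula (n-1) + (n-2)^2 // 4.

-- ===== PORT A =====
-- A's while loop. The Python guard is 'n != i + 1'; on every input admitted by Pre_solve
-- (n ≥ 1) the loop keeps i + 1 ≤ n, so that guard is equivalent to 'i + 1 < n', which we
-- use so the recursion terminates (for n ≤ 0 the Python loop never terminates; Pre_solve
-- excludes those inputs).
def solveLoop (n i cost res : Int) : Int :=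
  if i + 1 < n then
    let cost' := if i % 2 == 0 then cost + 1 else cost
    solveLoop n (i + 1) cost' (res + cost')
  else res
termination_by (n - i).toNat
decreasing_by omega

def solve (n : Int) : Int := solveLoop n 0 0 0

-- ===== PORT B =====
def solve_alt (n : Int) : Int :=
  let m := n - 1
  m + PySem.Int.floordiv ((m - 1) * (m - 1)) 4

-- ===== PRECONDITION & SPEC =====
-- Pre_solve excludes n ≤ 0, on which A's while loop never terminates (Python diverges).
def Pre_solve (n : Int) : Prop := 1 ≤ n
instance (n : Int) : Decidable (Pre_solve n) := by unfold Pre_solve; infer_instance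
def pvWitness_solve : Int := 5

def Spec_solve (n : Int) (out : Int) : Prop := out = solve_alt n
instance (n : Int) (out : Int) : Decidable (Spec_solve n out) := by unfold Spec_solve; infer_instance

-- ===== CLAIM (what is proved, stated in full; the proofs are below) =====
def Claim_equal_solve : Prop := ∀ (n : Int), Dom_solve n → Pre_solve n → Spec_solve n (solve n)

-- ===== LEMMAS AND PROOFS =====

-- partial sums of A's cost sequence, indexed by the parity flag of the current index
-- (e = true ⇔ current index is even) and the number of remaining loop iterations
def saux : Bool → Nat → Int
  | _, 0 => 0
  | e, Nat.succ k => (if e then (k : Int) + 1 else 0) + saux (!e) k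

lemma parity_flip (i : Int) : ((i + 1) % 2 == 0) = !(i % 2 == 0) := by
  have h := Int.emod_two_eq i
  rcases h with h | h <;> simp [h] <;> omega

lemma solveLoop_eq (k : Nat) : ∀ (i cost res : Int),
    solveLoop (i + 1 + k) i cost res = res + k * cost + saux (i % 2 == 0) k := by
  induction k with
  | zero =>
    intro i cost res
    rw [solveLoop]
    simp [saux]
  | succ k ih =>
    intro i cost res
    rw [solveLoop]
    have hg : i + 1 < i + 1 + (k + 1 : Nat) := by push_cast; omega
    simp only [hg, if_pos]
    have harg : i + 1 + (k + 1 : Nat) = (i + 1) + 1 + (k : Int) := by push_cast; ring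
    rw [harg]
    rcases he : (i % 2 == 0) with _ | _
    · simp only [Bool.false_eq_true, reduceIte]
      rw [ih (i + 1) cost (res + cost), parity_flip, he]
      simp only [saux, Bool.not_false]
      push_cast
      ring
    · simp only [reduceIte]
      rw [ih (i + 1) (cost + 1) (res + (cost + 1)), parity_flip, he]
      simp only [saux, Bool.not_true]
      push_cast
      ring

lemma saux_closed (k : Nat) :
    saux true k = (k : Int) + ((k : Int) - 1) * ((k : Int) - 1) / 4 ∧
    saux false k = (k : Int) * (k : Int) / 4 := by
  induction k with
  | zero => simp [saux]
  | succ k ih =>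
    obtain ⟨ht, hf⟩ := ih
    constructor
    · simp only [saux, Bool.not_true, hf]
      push_cast
      ring
    · simp only [saux, Bool.not_false, ht]
      push_cast
      have h : ((k : Int) + 1) * ((k : Int) + 1) = ((k : Int) - 1) * ((k : Int) - 1) + (k : Int) * 4 := by
        ring
      rw [h, Int.add_mul_ediv_right _ _ (by norm_num : (4 : Int) ≠ 0)]
      ring

-- ===== VERDICT (by name: the statement is the Claim_ definition above) =====
theorem solve_spec : Claim_equal_solve := by
  intro n _ hpre
  unfold Pre_solve at hpre
  unfold Spec_solve solve solve_alt
  have hk : n = 0 + 1 + ((n - 1).toNat : Int) := by omega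
  rw [hk, solveLoop_eq ((n - 1).toNat) 0 0 0]
  have he : ((0 : Int) % 2 == 0) = true := by decide
  rw [he]
  have hc := (saux_closed ((n - 1).toNat)).1
  rw [hc]
  have hcast : (((n - 1).toNat : Int)) = n - 1 := by omega
  rw [hcast]
  simp only [PySem.Int.floordiv_eq_ediv_of_pos (by norm_num : (0:Int) < 4)]
  ring_nf
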